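-- pv_equiv track=rewrite | github.com/surinkwon/TIL | python/SWEA/4012_요리사/4012_요리사.py | makeFood
-- ===== SOURCE A (Python) =====
-- def makeFood(ing, s):
--     food = 0
--     other_food = 0
--     for j in range(len(s)):
--         for k in range(len(s)):
--             # 고른 재료들의 시너지를 더해 요리를 만듦
--             if j in ing and k in ing:
--                 if k != j:
--                     food += s[j][k]
--             # 남은 재료들의 시너지를 더해 다른 요리를 만듦
--             elif j not in ing and k not in ing:
--                 if k != j:
--                     other_food += s[j][k]
--
--     return abs(other_food - food)
-- ===== SOURCE B (Python) =====
-- def makeFood(ing, s):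
--     n = len(s)
--     chosen = [i for i in range(n) if i in ing]
--     rest = [i for i in range(n) if i not in ing]
--     diff = 0
--     for sign, idx in ((-1, chosen), (1, rest)):
--         for a, j in enumerate(idx):
--             for k in idx[a + 1:]:
--                 diff += sign * (s[j][k] + s[k][j])
--     return abs(diff)
-- ===== Notes on version B (the rewrite author's own statement) =====
-- stated objective: faster
-- what changed: A's full N x N ordered-pair scan with two per-pair membership tests and two accumulators (food, other_food) is replaced by partitioning the indices once, then visiting each group's UNORDERED pairs a single time (upper triangle), folding both orientations s[j][k]+s[k][j] into ONE signed accumulator (-1 for chosen, +1 for rest) and taking abs at the end.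
import Mathlib
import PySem

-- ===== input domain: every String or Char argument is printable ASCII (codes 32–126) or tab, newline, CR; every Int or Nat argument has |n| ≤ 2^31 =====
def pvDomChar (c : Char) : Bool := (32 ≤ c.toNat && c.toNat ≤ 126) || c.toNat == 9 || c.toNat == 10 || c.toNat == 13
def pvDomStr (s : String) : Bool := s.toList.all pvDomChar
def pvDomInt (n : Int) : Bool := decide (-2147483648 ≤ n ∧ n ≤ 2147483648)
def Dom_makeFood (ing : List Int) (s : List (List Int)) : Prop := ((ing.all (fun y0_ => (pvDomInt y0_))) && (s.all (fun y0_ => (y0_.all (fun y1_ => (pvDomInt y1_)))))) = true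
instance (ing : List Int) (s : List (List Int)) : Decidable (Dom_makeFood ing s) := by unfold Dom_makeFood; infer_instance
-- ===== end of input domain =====

-- B replaces A's N×N ordered-pair scan with two membership tests per pair and two accumulators by:
-- partition the indices once, then visit each group's UNORDERED pairs once (upper triangle),
-- folding both orientations s[j][k]+s[k][j] into a single signed accumulator (objective: faster).

-- ===== PORT A =====
-- A's N×N double loop carrying the pair of accumulators (food, other_food);
-- s[j][k] is ported as getD (indices are in range for every access Pre_ admits).
def makeFood (ing : List Int) (s : List (List Int)) : Int :=
  let n := s.length
  let res := (List.range n).foldl (fun (acc : Int × Int) (j : Nat) =>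
    (List.range n).foldl (fun (acc : Int × Int) (k : Nat) =>
      if (j : Int) ∈ ing ∧ (k : Int) ∈ ing then
        if k ≠ j then (acc.1 + (s.getD j []).getD k 0, acc.2) else acc
      else if (j : Int) ∉ ing ∧ (k : Int) ∉ ing then
        if k ≠ j then (acc.1, acc.2 + (s.getD j []).getD k 0) else acc
      else acc) acc) (0, 0)
  |res.2 - res.1|

-- ===== PORT B =====
-- Source B: partition, then for each (sign, idx): for a, j in enumerate(idx): for k in idx[a+1:]: diff += sign*(s[j][k]+s[k][j]).
-- idx[a+1:] is PySem.List.slice (exact); s[j][k] as getD (in range under Pre_).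
def makeFood_alt (ing : List Int) (s : List (List Int)) : Int :=
  let n := s.length
  let chosen := (List.range n).filter (fun (i : Nat) => (i : Int) ∈ ing)
  let rest := (List.range n).filter (fun (i : Nat) => (i : Int) ∉ ing)
  let diff := [((-1 : Int), chosen), ((1 : Int), rest)].foldl
    (fun (diff : Int) si =>
      (PySem.List.enumerate si.2).foldl
        (fun (diff : Int) aj =>
          (PySem.List.slice si.2 (some (aj.1 + 1)) none).foldl
            (fun (diff : Int) k =>
              diff + si.1 * ((s.getD aj.2 []).getD k 0 + (s.getD k []).getD aj.2 0))
            diff)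
        diff)
    0
  |diff|

-- ===== PRECONDITION & SPEC =====
-- Pre_ excludes exactly the inputs where the Python A raises IndexError: some accessed
-- entry s[j][k] (both indices on the same side of the partition, k ≠ j) is missing.
def Pre_makeFood (ing : List Int) (s : List (List Int)) : Prop :=
  ∀ j ∈ List.range s.length, ∀ k ∈ List.range s.length, k ≠ j →
    (((j : Int) ∈ ing ∧ (k : Int) ∈ ing) ∨ ((j : Int) ∉ ing ∧ (k : Int) ∉ ing)) →
    k < (s.getD j []).length
instance (ing : List Int) (s : List (List Int)) : Decidable (Pre_makeFood ing s) := by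
  unfold Pre_makeFood; infer_instance

def pvWitness_makeFood : List Int × List (List Int) := ([0, 2], [[0, 1, 2], [3, 4, 5], [6, 7, 8]])

def Spec_makeFood (ing : List Int) (s : List (List Int)) (out : Int) : Prop := out = makeFood_alt ing s
instance (ing : List Int) (s : List (List Int)) (out : Int) : Decidable (Spec_makeFood ing s out) := by unfold Spec_makeFood; infer_instance

-- ===== CLAIM (what is proved, stated in full; the proofs are below) =====
def Claim_equal_makeFood : Prop := ∀ (ing : List Int) (s : List (List Int)), Dom_makeFood ing s → Pre_makeFood ing s → Spec_makeFood ing s (makeFood ing s)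

-- ===== LEMMAS AND PROOFS =====

-- proof-only helpers: the entry s[j][k] and the per-pair contributions of A's two accumulators
def pvE (s : List (List Int)) (j k : Nat) : Int := (s.getD j []).getD k 0
def pvF (ing : List Int) (s : List (List Int)) (j k : Nat) : Int :=
  if ((j : Int) ∈ ing ∧ (k : Int) ∈ ing) ∧ k ≠ j then pvE s j k else 0
def pvG (ing : List Int) (s : List (List Int)) (j k : Nat) : Int :=
  if ((j : Int) ∉ ing ∧ (k : Int) ∉ ing) ∧ k ≠ j then pvE s j k else 0

-- the ordered same-group double sum, written as B's inner data would produce it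
def pairSynergy (idx : List Nat) (s : List (List Int)) : Int :=
  (idx.flatMap (fun j => (idx.filter (fun k => k ≠ j)).map (fun k => (s.getD j []).getD k 0))).sum

-- B's upper-triangle signed traversal, structurally: head pairs with every later index, both orientations
def pvTri (s : List (List Int)) : List Nat → Int
  | [] => 0
  | j :: xs => (xs.map (fun k => pvE s j k + pvE s k j)).sum + pvTri s xs

theorem sum_flatMap' (l : List Nat) (f : Nat → List Int) :
    (l.flatMap f).sum = (l.map (fun x => (f x).sum)).sum := by
  induction l with
  | nil => simp
  | cons x xs ih => simp [List.flatMap_cons, ih]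

-- a fold that adds f x to the first and g x to the second component is a pair of sums
theorem foldl_pair_add (l : List Nat) (f g : Nat → Int) (a b : Int) :
    l.foldl (fun (acc : Int × Int) x => (acc.1 + f x, acc.2 + g x)) (a, b)
      = (a + (l.map f).sum, b + (l.map g).sum) := by
  induction l generalizing a b with
  | nil => simp
  | cons x xs ih => simp [List.foldl_cons, ih, add_assoc]

-- summing an if-then-else over a list is summing over the filtered list
theorem sum_map_ite (l : List Nat) (p : Nat → Bool) (f : Nat → Int) :
    (l.map (fun x => if p x then f x else 0)).sum = ((l.filter p).map f).sum := by
  induction l with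
  | nil => simp
  | cons x xs ih => by_cases h : p x <;> simp [h, ih]

theorem outer_step_eq (ing : List Int) (s : List (List Int)) (n : Nat) :
    (fun (acc : Int × Int) (j : Nat) =>
      (List.range n).foldl (fun (acc : Int × Int) (k : Nat) =>
        if (j : Int) ∈ ing ∧ (k : Int) ∈ ing then
          if k ≠ j then (acc.1 + (s.getD j []).getD k 0, acc.2) else acc
        else if (j : Int) ∉ ing ∧ (k : Int) ∉ ing then
          if k ≠ j then (acc.1, acc.2 + (s.getD j []).getD k 0) else acc
        else acc) acc)
    = (fun (acc : Int × Int) (j : Nat) =>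
        (acc.1 + ((List.range n).map (pvF ing s j)).sum,
         acc.2 + ((List.range n).map (pvG ing s j)).sum)) := by
  funext acc j
  have hstep : (fun (acc : Int × Int) (k : Nat) =>
      if (j : Int) ∈ ing ∧ (k : Int) ∈ ing then
        if k ≠ j then (acc.1 + (s.getD j []).getD k 0, acc.2) else acc
      else if (j : Int) ∉ ing ∧ (k : Int) ∉ ing then
        if k ≠ j then (acc.1, acc.2 + (s.getD j []).getD k 0) else acc
      else acc)
      = (fun (acc : Int × Int) (k : Nat) => (acc.1 + pvF ing s j k, acc.2 + pvG ing s j k)) := by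
    funext acc k
    simp only [pvF, pvG, pvE]
    split_ifs <;> simp_all
  rw [hstep]
  exact foldl_pair_add _ _ _ acc.1 acc.2

-- the double sum of one side's contributions is that side's pairSynergy over the filtered index list
theorem sum_pvF_eq (ing : List Int) (s : List (List Int)) (n : Nat) :
    ((List.range n).map (fun (j : Nat) => ((List.range n).map (pvF ing s j)).sum)).sum
      = pairSynergy ((List.range n).filter (fun (i : Nat) => (i : Int) ∈ ing)) s := by
  unfold pairSynergy
  rw [sum_flatMap']
  have h1 : ∀ (j : Nat), ((List.range n).map (pvF ing s j)).sum
      = if (fun (j : Nat) => decide ((j : Int) ∈ ing)) j then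
          ((((List.range n).filter (fun (i : Nat) => decide ((i : Int) ∈ ing))).filter
            (fun k => k ≠ j)).map (fun k => (s.getD j []).getD k 0)).sum
        else 0 := by
    intro j
    by_cases hj : (j : Int) ∈ ing
    · have he : (List.range n).map (pvF ing s j) = (List.range n).map (fun k =>
          if (fun (k : Nat) => decide ((k : Int) ∈ ing) && decide (k ≠ j)) k then pvE s j k else 0) := by
        apply List.map_congr_left; intro k _; simp [pvF, hj]
      rw [he, sum_map_ite, if_pos (by simpa using hj), List.filter_filter]
      simp only [Bool.and_comm]
      exact congrArg List.sum (List.map_congr_left (fun k _ => by simp [pvE, List.getD]))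
    · have he : (List.range n).map (pvF ing s j) = (List.range n).map (fun _ => (0 : Int)) := by
        apply List.map_congr_left; intro k _; simp [pvF, hj]
      rw [he, if_neg (by simpa using hj)]; simp
  calc ((List.range n).map (fun (j : Nat) => ((List.range n).map (pvF ing s j)).sum)).sum
      = ((List.range n).map (fun (j : Nat) => if (fun (j : Nat) => decide ((j : Int) ∈ ing)) j then
          ((((List.range n).filter (fun (i : Nat) => decide ((i : Int) ∈ ing))).filter
            (fun k => k ≠ j)).map (fun k => (s.getD j []).getD k 0)).sum else 0)).sum := by
        congr 1; exact List.map_congr_left (fun j _ => h1 j)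
    _ = _ := by rw [sum_map_ite]

theorem sum_pvG_eq (ing : List Int) (s : List (List Int)) (n : Nat) :
    ((List.range n).map (fun (j : Nat) => ((List.range n).map (pvG ing s j)).sum)).sum
      = pairSynergy ((List.range n).filter (fun (i : Nat) => (i : Int) ∉ ing)) s := by
  unfold pairSynergy
  rw [sum_flatMap']
  have h1 : ∀ (j : Nat), ((List.range n).map (pvG ing s j)).sum
      = if (fun (j : Nat) => decide ((j : Int) ∉ ing)) j then
          ((((List.range n).filter (fun (i : Nat) => decide ((i : Int) ∉ ing))).filter
            (fun k => k ≠ j)).map (fun k => (s.getD j []).getD k 0)).sum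
        else 0 := by
    intro j
    by_cases hj : (j : Int) ∉ ing
    · have he : (List.range n).map (pvG ing s j) = (List.range n).map (fun k =>
          if (fun (k : Nat) => decide ((k : Int) ∉ ing) && decide (k ≠ j)) k then pvE s j k else 0) := by
        apply List.map_congr_left; intro k _; simp [pvG, hj]
      rw [he, sum_map_ite, if_pos (by simpa using hj), List.filter_filter]
      simp only [Bool.and_comm]
      exact congrArg List.sum (List.map_congr_left (fun k _ => by simp [pvE, List.getD]))
    · have he : (List.range n).map (pvG ing s j) = (List.range n).map (fun _ => (0 : Int)) := by
        apply List.map_congr_left; intro k _; simp [pvG, hj]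
      rw [he, if_neg (by simpa using hj)]; simp
  calc ((List.range n).map (fun (j : Nat) => ((List.range n).map (pvG ing s j)).sum)).sum
      = ((List.range n).map (fun (j : Nat) => if (fun (j : Nat) => decide ((j : Int) ∉ ing)) j then
          ((((List.range n).filter (fun (i : Nat) => decide ((i : Int) ∉ ing))).filter
            (fun k => k ≠ j)).map (fun k => (s.getD j []).getD k 0)).sum else 0)).sum := by
        congr 1; exact List.map_congr_left (fun j _ => h1 j)
    _ = _ := by rw [sum_map_ite]

-- B's enumerate/slice double fold over one group computes d + c · pvTri: the head of the remaining
-- tail (at offset a in the full list) pairs with exactly the indices after position a.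
theorem foldB_eq (s : List (List Int)) (c : Int) (full : List Nat) :
    ∀ (tail : List Nat) (a : Nat) (d : Int), full.drop a = tail →
    (PySem.List.enumerate tail (a : Int)).foldl
      (fun (diff : Int) aj =>
        (PySem.List.slice full (some (aj.1 + 1)) none).foldl
          (fun (diff : Int) k =>
            diff + c * ((s.getD aj.2 []).getD k 0 + (s.getD k []).getD aj.2 0))
          diff)
      d = d + c * pvTri s tail := by
  intro tail
  induction tail with
  | nil => intro a d _; simp [PySem.List.enumerate_nil, pvTri]
  | cons x xs ih =>
    intro a d hdrop
    rw [PySem.List.enumerate_cons, List.foldl_cons]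
    have hcast : ((a : Int) + 1) = ((a + 1 : Nat) : Int) := by push_cast; ring
    have hdrop1 : full.drop (a + 1) = xs := by
      rw [← List.tail_drop, hdrop, List.tail_cons]
    have hslice : PySem.List.slice full (some ((a : Int) + 1)) none = xs := by
      rw [hcast, PySem.List.slice_from_natCast, hdrop1]
    have hinner : ∀ d0 : Int,
        (PySem.List.slice full (some ((a : Int) + 1)) none).foldl
          (fun (diff : Int) k =>
            diff + c * ((s.getD x []).getD k 0 + (s.getD k []).getD x 0)) d0
        = d0 + c * (xs.map (fun k => pvE s x k + pvE s k x)).sum := by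
      intro d0
      rw [hslice, PySem.List.foldl_add]
      have : (xs.map (fun k => c * ((s.getD x []).getD k 0 + (s.getD k []).getD x 0))).sum
          = c * (xs.map (fun k => pvE s x k + pvE s k x)).sum := by
        simpa [pvE] using List.sum_map_mul_left xs (fun k => pvE s x k + pvE s k x) c
      rw [this]
    rw [hinner d, hcast, ih (a + 1) _ hdrop1]
    simp [pvTri]; ring

theorem foldB_eq_zero (s : List (List Int)) (c : Int) (idx : List Nat) (d : Int) :
    (PySem.List.enumerate idx).foldl
      (fun (diff : Int) aj =>
        (PySem.List.slice idx (some (aj.1 + 1)) none).foldl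
          (fun (diff : Int) k =>
            diff + c * ((s.getD aj.2 []).getD k 0 + (s.getD k []).getD aj.2 0))
          diff)
      d = d + c * pvTri s idx := by
  have h := foldB_eq s c idx idx 0 d (by simp)
  simpa only [Nat.cast_zero] using h

-- on a Nodup index list, the upper-triangle signed traversal equals the ordered double sum
theorem pvTri_eq_pairSynergy (s : List (List Int)) (idx : List Nat) (h : idx.Nodup) :
    pvTri s idx = pairSynergy idx s := by
  induction idx with
  | nil => simp [pvTri, pairSynergy]
  | cons x xs ih =>
    have hx : x ∉ xs := (List.nodup_cons.mp h).1
    have hxs : xs.Nodup := (List.nodup_cons.mp h).2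
    unfold pairSynergy
    rw [List.flatMap_cons, List.sum_append]
    have hfx : (x :: xs).filter (fun k => k ≠ x) = xs := by
      rw [List.filter_cons]
      simp only [ne_eq, not_true_eq_false, decide_false]
      exact List.filter_eq_self.mpr (fun k hk => by
        simp only [decide_eq_true_eq]
        exact fun he => hx (he ▸ hk))
    have hmain : (xs.flatMap (fun j => (((x :: xs).filter (fun k => k ≠ j)).map
          (fun k => (s.getD j []).getD k 0)))).sum
        = (xs.map (fun j => pvE s j x)).sum + pairSynergy xs s := by
      unfold pairSynergy
      rw [sum_flatMap', sum_flatMap']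
      have hone : ∀ j ∈ xs, ((((x :: xs).filter (fun k => k ≠ j)).map
            (fun k => (s.getD j []).getD k 0)).sum : Int)
          = pvE s j x + ((xs.filter (fun k => k ≠ j)).map (fun k => (s.getD j []).getD k 0)).sum := by
        intro j hj
        have hjx : x ≠ j := fun he => hx (he ▸ hj)
        rw [List.filter_cons, if_pos (by simpa using hjx)]
        simp [pvE]
      calc (xs.map (fun j => (((x :: xs).filter (fun k => k ≠ j)).map
              (fun k => (s.getD j []).getD k 0)).sum)).sum
          = (xs.map (fun j => pvE s j x
              + ((xs.filter (fun k => k ≠ j)).map (fun k => (s.getD j []).getD k 0)).sum)).sum := by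
            congr 1; exact List.map_congr_left hone
        _ = _ := by
            induction xs with
            | nil => simp
            | cons y ys ihy => simp_all; ring
    rw [hfx, hmain, ← ih hxs]
    have hsplit : ((xs.map (fun k => pvE s x k + pvE s k x)).sum : Int)
        = (xs.map (fun k => pvE s x k)).sum + (xs.map (fun k => pvE s k x)).sum := by
      induction xs with
      | nil => simp
      | cons y ys ihy => simp_all; ring
    simp only [pvTri]
    rw [hsplit]
    simp [pvE]
    ring

theorem makeFood_eq_alt (ing : List Int) (s : List (List Int)) :
    makeFood ing s = makeFood_alt ing s := by
  simp only [makeFood, makeFood_alt]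
  rw [outer_step_eq ing s s.length, foldl_pair_add]
  simp only [zero_add]
  rw [sum_pvF_eq ing s s.length, sum_pvG_eq ing s s.length]
  rw [List.foldl_cons, List.foldl_cons, List.foldl_nil]
  dsimp only
  rw [foldB_eq_zero s (-1), foldB_eq_zero s 1]
  rw [pvTri_eq_pairSynergy s _ (List.nodup_range.filter _),
      pvTri_eq_pairSynergy s _ (List.nodup_range.filter _)]
  congr 1
  ring

-- ===== VERDICT (by name: the statement is the Claim_ definition above) =====
theorem makeFood_spec : Claim_equal_makeFood := by
  intro ing s _ _
  exact makeFood_eq_alt ing s
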